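-- pv_equiv track=rewrite | github.com/Parkyes90/algo | local/q3.py | solution
-- ===== SOURCE A (Python) =====
-- from itertools import combinations
--
-- def is_under_k(nums, K):
--     for i in range(1, len(nums)):
--         diff = abs(nums[i - 1] - nums[i])
--         if diff > K:
--             return False
--     return True
--
-- def solution(numbers, K):
--     length = len(numbers)
--     if is_under_k(numbers, K):
--         return 0
--     index_list = (i for i in range(length))
--     swap_combs = list(combinations(index_list, 2))
--     for i in range(1, length):
--         combs = combinations(swap_combs, i)
--         for comb in combs:
--             temp = [n for n in numbers]
--             for x, y in comb:
--                 temp[x], temp[y] = temp[y], temp[x]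
--             if is_under_k(temp, K):
--                 return i
--     return -1
-- ===== SOURCE B (Python) =====
-- from itertools import combinations
--
-- def solution(numbers, K):
--     n = len(numbers)
--
--     def ok(nums):
--         return all(abs(nums[i - 1] - nums[i]) <= K for i in range(1, n))
--
--     if ok(numbers):
--         return 0
--     pairs = list(combinations(range(n), 2))
--     temp = list(numbers)
--
--     def dfs(start, d):
--         if d == 0:
--             return ok(temp)
--         for idx in range(start, len(pairs)):
--             x, y = pairs[idx]
--             temp[x], temp[y] = temp[y], temp[x]
--             if dfs(idx + 1, d - 1):
--                 return True
--             temp[x], temp[y] = temp[y], temp[x]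
--         return False
--
--     for d in range(1, n):
--         if dfs(0, d):
--             return d
--     return -1
-- ===== Notes on version B (the rewrite author's own statement) =====
-- stated objective: alternative
-- what changed: Replaces the flat itertools.combinations(swap_combs, i) materialisation of each swap-subset (copying the list per candidate) with iterative-deepening recursive backtracking that swaps in place on the way down and undoes on the way up, enumerating the same increasing-index subsets.
import Mathlib
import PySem

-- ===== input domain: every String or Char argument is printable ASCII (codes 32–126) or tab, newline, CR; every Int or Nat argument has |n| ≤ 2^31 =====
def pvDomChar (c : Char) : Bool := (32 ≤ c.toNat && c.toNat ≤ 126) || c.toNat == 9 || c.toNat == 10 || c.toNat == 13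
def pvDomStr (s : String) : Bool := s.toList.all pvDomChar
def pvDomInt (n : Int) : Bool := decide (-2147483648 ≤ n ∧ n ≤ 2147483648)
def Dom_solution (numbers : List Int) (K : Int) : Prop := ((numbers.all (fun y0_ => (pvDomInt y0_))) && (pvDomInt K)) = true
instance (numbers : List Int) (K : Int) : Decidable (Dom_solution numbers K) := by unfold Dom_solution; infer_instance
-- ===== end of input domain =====

-- B replaces the flat combinations(swap_combs, i) enumeration (fresh list copy per
-- candidate subset) with iterative-deepening recursive backtracking over the same
-- sorted pair list, swapping in place going down and undoing going up (alternative
-- decomposition, same enumeration order; no speed claim).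

-- ===== PORT A =====
-- is_under_k: loop `for i in range(1, len)`; indices i-1, i are always in range, so
-- `getD _ 0` is exact (the default is never read).
def pvIsUnderK (nums : List Int) (K : Int) : Bool :=
  (List.range' 1 (nums.length - 1)).all
    (fun i => !decide (|nums.getD (i - 1) 0 - nums.getD i 0| > K))

-- the simultaneous assignment temp[x], temp[y] = temp[y], temp[x]; x, y always in range
def pvSwap (l : List Int) (p : Nat × Nat) : List Int :=
  (l.set p.1 (l.getD p.2 0)).set p.2 (l.getD p.1 0)

-- port of itertools.combinations(range(n), 2): pairs (i, j), i < j, in sorted order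
def pvPairs (n : Nat) : List (Nat × Nat) :=
  (List.range n).flatMap (fun i => ((List.range n).drop (i + 1)).map (fun j => (i, j)))

-- port of itertools.combinations(ps, k): size-k sublists of ps in ps's order
def pvCombs {α : Type} : Nat → List α → List (List α)
  | 0, _ => [[]]
  | _ + 1, [] => []
  | k + 1, x :: xs => (pvCombs k xs).map (x :: ·) ++ pvCombs (k + 1) xs

-- A's inner `for comb in combs: temp = copy; apply swaps; if is_under_k: return i`
def pvTryA (numbers : List Int) (K : Int) (combs : List (List (Nat × Nat))) : Bool :=
  combs.any (fun comb => pvIsUnderK (comb.foldl pvSwap numbers) K)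

-- A's outer `for i in range(1, length)` with early return
def pvLoopA (numbers : List Int) (K : Int) : List Nat → Int
  | [] => -1
  | i :: rest =>
    if pvTryA numbers K (pvCombs i (pvPairs numbers.length)) then (i : Int)
    else pvLoopA numbers K rest

def solution (numbers : List Int) (K : Int) : Int :=
  if pvIsUnderK numbers K then 0
  else pvLoopA numbers K (List.range' 1 (numbers.length - 1))

-- ===== PORT B =====
-- B's recursive dfs(start, d): depth 0 tests the current (in-place swapped) list;
-- otherwise it either takes the next pair (swap, recurse deeper on the tail — the
-- undo on the way up is the pure recursion passing `temp` unchanged) or skips it.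
def pvDfs (K : Int) : Nat → List (Nat × Nat) → List Int → Bool
  | 0, _, temp => pvIsUnderK temp K
  | _ + 1, [], _ => false
  | d + 1, p :: ps, temp => pvDfs K d ps (pvSwap temp p) || pvDfs K (d + 1) ps temp

-- B's outer iterative-deepening loop `for d in range(1, n)`
def pvLoopB (numbers : List Int) (K : Int) (pairs : List (Nat × Nat)) : List Nat → Int
  | [] => -1
  | d :: rest =>
    if pvDfs K d pairs numbers then (d : Int)
    else pvLoopB numbers K pairs rest

def solution_alt (numbers : List Int) (K : Int) : Int :=
  if pvIsUnderK numbers K then 0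
  else pvLoopB numbers K (pvPairs numbers.length) (List.range' 1 (numbers.length - 1))

-- ===== PRECONDITION & SPEC =====
def Spec_solution (numbers : List Int) (K : Int) (out : Int) : Prop := out = solution_alt numbers K
instance (numbers : List Int) (K : Int) (out : Int) : Decidable (Spec_solution numbers K out) := by unfold Spec_solution; infer_instance

-- ===== CLAIM (what is proved, stated in full; the proofs are below) =====
def Claim_equal_solution : Prop := ∀ (numbers : List Int) (K : Int), Dom_solution numbers K → Spec_solution numbers K (solution numbers K)

-- ===== LEMMAS AND PROOFS =====

-- the backtracking search at depth d over pairs ps equals A's scan over the size-d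
-- combinations of ps (same order of swap application inside each subset)
theorem pvDfs_eq_any (K : Int) (d : Nat) (ps : List (Nat × Nat)) (t : List Int) :
    pvDfs K d ps t = (pvCombs d ps).any (fun c => pvIsUnderK (c.foldl pvSwap t) K) := by
  induction ps generalizing d t with
  | nil =>
    cases d with
    | zero => simp [pvDfs, pvCombs]
    | succ d => simp [pvDfs, pvCombs]
  | cons p ps ih =>
    cases d with
    | zero => simp [pvDfs, pvCombs]
    | succ d =>
      simp [pvDfs, pvCombs, List.any_append, List.any_map, ih, Function.comp_def]

theorem pvLoop_eq (numbers : List Int) (K : Int) (ds : List Nat) :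
    pvLoopA numbers K ds = pvLoopB numbers K (pvPairs numbers.length) ds := by
  induction ds with
  | nil => rfl
  | cons d rest ih =>
    simp only [pvLoopA, pvLoopB, pvTryA, pvDfs_eq_any, ih]

-- ===== VERDICT (by name: the statement is the Claim_ definition above) =====
theorem solution_spec : Claim_equal_solution := by
  intro numbers K _
  unfold Spec_solution solution solution_alt
  by_cases h : pvIsUnderK numbers K = true
  · simp [h]
  · simp [h, pvLoop_eq]
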